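-- pv_equiv track=rewrite | github.com/justanotherbyte/eurisko | hello_world/number_systems.py | decimal_to_base_b
-- ===== SOURCE A (Python) =====
-- def _get_largest_n(b: int, number: int) -> int:
--     n = 0
--     while True:
--         if (b**n) > number:
--             return n - 1
--
--         n += 1
--
-- def _get_largest_multiple(b_n: int, number: int) -> int:
--     n = 0
--     while True:
--         if (b_n * n) > number:
--             return n - 1
--
--         n += 1
--
-- def decimal_to_base_b(b: int, number: int) -> list[int]:
--     coefficients = []
--     power = _get_largest_n(b, number)
--     while power >= 0:
--         coef = _get_largest_multiple(b**power, number)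
--         coefficients.append(coef)
--         number -= coef * (b**power)
--         power -= 1
--
--     return coefficients
-- ===== SOURCE B (Python) =====
-- def decimal_to_base_b(b: int, number: int) -> list[int]:
--     digits = []
--     while number > 0:
--         number, d = divmod(number, b)
--         digits.append(d)
--     return digits[::-1]
-- ===== Notes on version B (the rewrite author's own statement) =====
-- stated objective: faster
-- what changed: Extracts digits with repeated divmod from the least-significant end instead of linearly searching for the largest power and then linearly searching for each coefficient.
import Mathlib
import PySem

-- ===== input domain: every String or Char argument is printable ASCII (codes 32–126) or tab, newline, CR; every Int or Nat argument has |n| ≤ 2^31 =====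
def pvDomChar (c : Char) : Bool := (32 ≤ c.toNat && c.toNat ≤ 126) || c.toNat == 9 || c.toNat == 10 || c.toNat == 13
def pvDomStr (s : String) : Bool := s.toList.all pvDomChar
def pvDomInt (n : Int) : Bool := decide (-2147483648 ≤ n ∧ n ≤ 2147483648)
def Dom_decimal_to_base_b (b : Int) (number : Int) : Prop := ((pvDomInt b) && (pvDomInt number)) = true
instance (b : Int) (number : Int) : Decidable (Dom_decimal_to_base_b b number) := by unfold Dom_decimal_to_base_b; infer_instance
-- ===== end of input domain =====

-- B replaces A's two linear searches (largest power, then largest coefficient per power)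
-- by repeated divmod digit extraction; a timing run measures it faster.


-- ===== PORT A =====
-- `while True: if b**n > number: return n-1; n += 1` — fueled loop, counter n : Nat
-- (the Python counter only ever counts up from 0); fuel number.toNat+2 always suffices
-- on Pre_, so the port is exact there.
def pvGetLargestN (b number : Int) : Nat → Nat → Int
  | 0, n => (n : Int) - 1
  | f + 1, n => if b ^ n > number then (n : Int) - 1 else pvGetLargestN b number f (n + 1)

def pvGetLargestMultiple (b_n number : Int) : Nat → Nat → Int
  | 0, n => (n : Int) - 1
  | f + 1, n => if b_n * (n : Int) > number then (n : Int) - 1 else pvGetLargestMultiple b_n number f (n + 1)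

-- the outer `while power >= 0` loop; fuel power.toNat+1 is exactly its iteration count
def pvOuter (b : Int) : Nat → Int → Int → List Int → List Int
  | 0, _, _, acc => acc
  | f + 1, power, number, acc =>
    if power ≥ 0 then
      let coef := pvGetLargestMultiple (b ^ power.toNat) number (number.toNat + 2) 0
      pvOuter b f (power - 1) (number - coef * b ^ power.toNat) (acc ++ [coef])
    else acc

def decimal_to_base_b (b : Int) (number : Int) : List Int :=
  let power := pvGetLargestN b number (number.toNat + 2) 0
  pvOuter b (power.toNat + 1) power number []

-- ===== PORT B =====
-- `while number > 0: number, d = divmod(number, b); digits.append(d)`; return digits[::-1]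
def pvAltLoop (b : Int) : Nat → Int → List Int → List Int
  | 0, _, digits => digits
  | f + 1, number, digits =>
    if number > 0 then
      pvAltLoop b f (PySem.Int.floordiv number b) (digits ++ [PySem.Int.mod number b])
    else digits

def decimal_to_base_b_alt (b : Int) (number : Int) : List Int :=
  (pvAltLoop b (number.toNat + 1) number []).reverse

-- ===== PRECONDITION & SPEC =====
-- A returns exactly when b ≥ 2 or number ≤ 0; on every other input (b ≤ 1 with a
-- positive number) one of A's two search loops never exits, so A diverges — Pre_
-- excludes no input on which A returns.
def Pre_decimal_to_base_b (b : Int) (number : Int) : Prop := 2 ≤ b ∨ number ≤ 0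
instance (b : Int) (number : Int) : Decidable (Pre_decimal_to_base_b b number) := by unfold Pre_decimal_to_base_b; infer_instance
def pvWitness_decimal_to_base_b : Int × Int := (2, 11)

def Spec_decimal_to_base_b (b : Int) (number : Int) (out : List Int) : Prop := out = decimal_to_base_b_alt b number
instance (b : Int) (number : Int) (out : List Int) : Decidable (Spec_decimal_to_base_b b number out) := by unfold Spec_decimal_to_base_b; infer_instance

-- ===== CLAIM (what is proved, stated in full; the proofs are below) =====
def Claim_equal_decimal_to_base_b : Prop := ∀ (b : Int) (number : Int), Dom_decimal_to_base_b b number → Pre_decimal_to_base_b b number → Spec_decimal_to_base_b b number (decimal_to_base_b b number)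

-- ===== LEMMAS AND PROOFS =====

-- reference list: most-significant-first digits of n for powers p down to 0
def pvMsd (b : Int) : Nat → Int → List Int
  | 0, n => [n]
  | p + 1, n => n / b ^ (p + 1) :: pvMsd b p (n % b ^ (p + 1))

theorem pvMsd_succ (b : Int) (hb : 2 ≤ b) (p : Nat) (n : Int) (hn : 0 ≤ n) :
    pvMsd b (p + 1) n = pvMsd b p (n / b) ++ [n % b] := by
  induction p generalizing n with
  | zero => simp [pvMsd, pow_one]
  | succ p ih =>
      have hb0 : (0:Int) < b := by omega
      have hbp : (0:Int) < b ^ (p + 2) := by positivity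
      have hr0 : 0 ≤ n % b ^ (p + 2) := Int.emod_nonneg n (ne_of_gt hbp)
      have hrlt : n % b ^ (p + 2) < b ^ (p + 2) := Int.emod_lt_of_pos n hbp
      have hn' : n = n % b ^ (p + 2) + b ^ (p + 1) * (n / b ^ (p + 2)) * b := by
        have h := Int.ediv_add_emod n (b ^ (p + 2))
        have he : b ^ (p + 1) * (n / b ^ (p + 2)) * b = b ^ (p + 2) * (n / b ^ (p + 2)) := by ring
        linarith
      have hdiv : n / b = n % b ^ (p + 2) / b + b ^ (p + 1) * (n / b ^ (p + 2)) := by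
        conv_lhs => rw [hn']
        rw [Int.add_mul_ediv_right _ _ (by omega : b ≠ 0)]
      have hrb_lt : n % b ^ (p + 2) / b < b ^ (p + 1) := by
        rw [Int.ediv_lt_iff_lt_mul hb0]
        calc n % b ^ (p + 2) < b ^ (p + 2) := hrlt
          _ = b ^ (p + 1) * b := by ring
      have hrb0 : 0 ≤ n % b ^ (p + 2) / b := Int.ediv_nonneg hr0 (by omega)
      have h1 : n / b % b ^ (p + 1) = n % b ^ (p + 2) / b := by
        rw [hdiv, Int.add_mul_emod_self_left, Int.emod_eq_of_lt hrb0 hrb_lt]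
      have h2 : n % b ^ (p + 2) % b = n % b := by
        conv_rhs => rw [hn', show n % b ^ (p + 2) + b ^ (p + 1) * (n / b ^ (p + 2)) * b
          = n % b ^ (p + 2) + b * (b ^ (p + 1) * (n / b ^ (p + 2))) from by ring]
        rw [Int.add_mul_emod_self_left]
      have h3 : n / b / b ^ (p + 1) = n / b ^ (p + 2) := by
        rw [hdiv, Int.add_mul_ediv_left _ _ (by positivity : (b:ℤ) ^ (p+1) ≠ 0),
          Int.ediv_eq_zero_of_lt hrb0 hrb_lt, zero_add]
      rw [pvMsd]
      simp only [show p + 1 + 1 = p + 2 from rfl]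
      rw [ih _ hr0, pvMsd, h1, h2, h3]
      simp

-- first-exit characterisation of _get_largest_n
theorem pvGLN_spec (b number : Int) (hb : 2 ≤ b) (p : Nat)
    (h1 : b ^ p ≤ number) (h2 : number < b ^ (p + 1)) :
    ∀ f k, k ≤ p + 1 → p + 2 - k ≤ f → pvGetLargestN b number f k = (p : Int) := by
  intro f
  induction f with
  | zero => intro k hk hf; omega
  | succ f ih =>
      intro k hk hf
      rcases Nat.lt_or_ge k (p + 1) with h | h
      · have hle : b ^ k ≤ b ^ p := pow_le_pow_right₀ (by omega) (by omega)
        rw [pvGetLargestN, if_neg (by omega)]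
        exact ih (k + 1) (by omega) (by omega)
      · have hk' : k = p + 1 := by omega
        subst hk'
        rw [pvGetLargestN, if_pos (by omega)]
        push_cast; ring

-- first-exit characterisation of _get_largest_multiple: it computes number / m for m > 0
theorem pvGLM_spec (m number : Int) (hm : 0 < m) (hn : 0 ≤ number) :
    ∀ (f : Nat) (k : Nat), (k : Int) ≤ number / m + 1 → (number / m + 2 - (k : Int)) ≤ (f : Int) →
      pvGetLargestMultiple m number f k = number / m := by
  intro f
  induction f with
  | zero => intro k hk hf; omega
  | succ f ih =>
      intro k hk hf
      rcases lt_or_ge (k : Int) (number / m + 1) with h | h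
      · have hmk : m * (k : Int) ≤ number := by
          have := (Int.le_ediv_iff_mul_le hm (a := (k : Int)) (b := number)).mp (by omega)
          linarith
        rw [pvGetLargestMultiple, if_neg (by omega)]
        exact ih (k + 1) (by push_cast; omega) (by push_cast at hf ⊢; omega)
      · have hgt : m * (k : Int) > number := by
          have := (Int.ediv_lt_iff_lt_mul hm (a := number) (b := (k : Int))).mp (by omega)
          linarith
        rw [pvGetLargestMultiple, if_pos hgt]
        omega

theorem pvOuter_neg (b power number : Int) (acc : List Int) (hp : power < 0) :
    ∀ f, pvOuter b f power number acc = acc := by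
  intro f
  cases f with
  | zero => rfl
  | succ f => rw [pvOuter, if_neg (by omega)]

-- the outer loop produces the msd digit list
theorem pvOuter_spec (b : Int) (hb : 2 ≤ b) :
    ∀ (p f : Nat) (n : Int) (acc : List Int), 0 ≤ n → n < b ^ (p + 1) → p + 1 ≤ f →
      pvOuter b f (p : Int) n acc = acc ++ pvMsd b p n := by
  intro p
  induction p with
  | zero =>
      intro f n acc hn hlt hf
      match f, hf with
      | f + 1, _ =>
        rw [pvOuter, if_pos (by omega)]
        have hc : pvGetLargestMultiple 1 n (n.toNat + 2) 0 = n := by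
          have h := pvGLM_spec 1 n one_pos hn (n.toNat + 2) 0
            (by rw [Int.ediv_one]; omega) (by rw [Int.ediv_one]; push_cast; omega)
          rw [h, Int.ediv_one]
        simp only [Nat.cast_zero, Int.toNat_zero, pow_zero, hc, mul_one, sub_self]
        rw [show (0:Int) - 1 = -1 from rfl, pvOuter_neg b (-1) 0 _ (by norm_num)]
        simp [pvMsd]
  | succ p ih =>
      intro f n acc hn hlt hf
      match f, hf with
      | f + 1, _ =>
        have hb0 : (0:Int) < b := by omega
        have hm : (0:Int) < b ^ (p + 1) := by positivity
        rw [pvOuter, if_pos (by omega)]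
        have htn : (((p + 1 : Nat)) : Int).toNat = p + 1 := by omega
        have hdle : n / b ^ (p + 1) ≤ n := Int.ediv_le_self _ hn
        have hd0 : 0 ≤ n / b ^ (p + 1) := Int.ediv_nonneg hn (by omega)
        have hc : pvGetLargestMultiple (b ^ (p + 1)) n (n.toNat + 2) 0
            = n / b ^ (p + 1) :=
          pvGLM_spec (b ^ (p + 1)) n hm hn (n.toNat + 2) 0 (by push_cast; omega)
            (by push_cast; omega)
        simp only [htn, hc]
        have hstep : ((p + 1 : Nat) : Int) - 1 = (p : Int) := by push_cast; ring
        have hrem : n - n / b ^ (p + 1) * b ^ (p + 1) = n % b ^ (p + 1) := by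
          rw [Int.emod_def]; ring
        rw [hstep, hrem, ih f (n % b ^ (p + 1)) _ (Int.emod_nonneg n (ne_of_gt hm))
          (Int.emod_lt_of_pos n hm) (by omega)]
        conv_rhs => rw [pvMsd]
        simp

-- B's loop collects the least-significant digits in order
def pvLsb (b : Int) : Nat → Int → List Int
  | 0, _ => []
  | f + 1, n => if n > 0 then n % b :: pvLsb b f (n / b) else []

theorem pvAltLoop_eq (b : Int) (hb : 2 ≤ b) :
    ∀ f (n : Int) acc, pvAltLoop b f n acc = acc ++ pvLsb b f n := by
  intro f
  induction f with
  | zero => intro n acc; simp [pvAltLoop, pvLsb]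
  | succ f ih =>
      intro n acc
      rw [pvAltLoop, pvLsb]
      split_ifs with h
      · rw [PySem.Int.floordiv_eq_ediv_of_pos (by omega), PySem.Int.mod_eq_emod_of_pos (by omega), ih]
        simp
      · simp

theorem pvLsb_reverse (b : Int) (hb : 2 ≤ b) (p : Nat) :
    ∀ (n : Int) f, b ^ p ≤ n → n < b ^ (p + 1) → p + 1 ≤ f →
      (pvLsb b f n).reverse = pvMsd b p n := by
  induction p with
  | zero =>
      intro n f h1 h2 hf
      match f, hf with
      | f + 1, _ =>
        have h1' : 1 ≤ n := by simpa using h1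
        have h2' : n < b := by simpa using h2
        rw [pvLsb, if_pos (by omega)]
        have hn0 : n / b = 0 := Int.ediv_eq_zero_of_lt (by omega) h2'
        have hnil : pvLsb b f 0 = [] := by
          cases f with
          | zero => rfl
          | succ f => rw [pvLsb, if_neg (by omega)]
        simp [hn0, hnil, pvMsd, Int.emod_eq_of_lt (by omega : (0:Int) ≤ n) h2']
  | succ p ih =>
      intro n f h1 h2 hf
      match f, hf with
      | f + 1, _ =>
        have hb0 : (0:Int) < b := by omega
        have hn0 : (0:Int) < n := lt_of_lt_of_le (by positivity) h1
        rw [pvLsb, if_pos (by omega)]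
        have hd1 : b ^ p ≤ n / b := by
          rw [Int.le_ediv_iff_mul_le hb0]
          calc b ^ p * b = b ^ (p + 1) := by ring
            _ ≤ n := h1
        have hd2 : n / b < b ^ (p + 1) := by
          rw [Int.ediv_lt_iff_lt_mul hb0]
          calc n < b ^ (p + 2) := h2
            _ = b ^ (p + 1) * b := by ring
        simp only [List.reverse_cons]
        rw [ih (n / b) f hd1 hd2 (by omega), pvMsd_succ b hb p n (by omega)]

-- ===== VERDICT (by name: the statement is the Claim_ definition above) =====
theorem decimal_to_base_b_spec : Claim_equal_decimal_to_base_b := by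
  intro b number _hDom hPre
  show decimal_to_base_b b number = decimal_to_base_b_alt b number
  by_cases hn : number ≤ 0
  · -- both return []
    have ht : number.toNat = 0 := by omega
    have hA : decimal_to_base_b b number = [] := by
      unfold decimal_to_base_b
      have hgln : pvGetLargestN b number (number.toNat + 2) 0 = -1 := by
        rw [ht, show (0:Nat) + 2 = 1 + 1 from rfl, pvGetLargestN,
          if_pos (by simpa using by omega)]
        norm_num
      simp only [hgln, show ((-1 : Int)).toNat = 0 from rfl]
      exact pvOuter_neg b (-1) number [] (by norm_num) _
    have hB : decimal_to_base_b_alt b number = [] := by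
      unfold decimal_to_base_b_alt
      rw [ht, pvAltLoop, if_neg (by omega)]
      rfl
    rw [hA, hB]
  · -- b ≥ 2 and number ≥ 1
    have hb : 2 ≤ b := by rcases hPre with h | h; exact h; omega
    have hn1 : 1 ≤ number := by omega
    have hbn : 2 ≤ b.toNat := by omega
    set p := Nat.log b.toNat number.toNat with hp
    have hlow' : b.toNat ^ p ≤ number.toNat := Nat.pow_log_le_self b.toNat (by omega)
    have hhigh' : number.toNat < b.toNat ^ (p + 1) := Nat.lt_pow_succ_log_self (by omega) _
    have hcast : ((b.toNat : Int)) = b := by omega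
    have hncast : ((number.toNat : Int)) = number := by omega
    have hlow : b ^ p ≤ number := by
      have := Int.ofNat_le.mpr hlow'
      push_cast at this; rw [hcast, hncast] at this; exact this
    have hhigh : number < b ^ (p + 1) := by
      have := Int.ofNat_lt.mpr hhigh'
      push_cast at this; rw [hcast, hncast] at this; exact this
    have hpn : p ≤ number.toNat := by
      have h2p : p < 2 ^ p := Nat.lt_two_pow_self
      have hbp : 2 ^ p ≤ b.toNat ^ p := Nat.pow_le_pow_left hbn p
      omega
    -- A side
    have hgln : pvGetLargestN b number (number.toNat + 2) 0 = (p : Int) :=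
      pvGLN_spec b number hb p hlow hhigh _ 0 (by omega) (by omega)
    have hA : decimal_to_base_b b number = pvMsd b p number := by
      unfold decimal_to_base_b
      simp only [hgln, Int.toNat_natCast]
      simpa using pvOuter_spec b hb p (p + 1) number [] (by omega) hhigh (le_refl _)
    -- B side
    have hB : decimal_to_base_b_alt b number = pvMsd b p number := by
      unfold decimal_to_base_b_alt
      rw [pvAltLoop_eq b hb]
      simp only [List.nil_append]
      exact pvLsb_reverse b hb p number (number.toNat + 1) hlow hhigh (by omega)
    rw [hA, hB]
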